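-- pv_equiv track=rewrite | github.com/andrels17/revisao_lub | services/dashboard_service.py | resumo_kpis
-- ===== SOURCE A (Python) =====
-- from collections import Counter, defaultdict
--
-- def resumo_kpis(alertas, total_equipamentos: int):
--     contagem = Counter(item["status"] for item in alertas)
--     eqp_alerta = {a["equipamento_id"] for a in alertas if a["status"] in {"VENCIDO", "PROXIMO"}}
--     eqp_vencido = {a["equipamento_id"] for a in alertas if a["status"] == "VENCIDO"}
--     eqp_proximo = {a["equipamento_id"] for a in alertas if a["status"] == "PROXIMO"}
--
--     return {
--         "total_equipamentos": total_equipamentos,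
--         "total_alertas": len(alertas),
--         "vencidos": contagem.get("VENCIDO", 0),
--         "proximos": contagem.get("PROXIMO", 0),
--         "em_dia": contagem.get("EM DIA", 0),
--         "equipamentos_com_alerta": len(eqp_alerta),
--         "equipamentos_vencidos": len(eqp_vencido),
--         "equipamentos_proximos": len(eqp_proximo),
--     }
-- ===== SOURCE B (Python) =====
-- def _run_count(sorted_xs, x):
--     # number of occurrences of x in a sorted list: scan its run, stop past it
--     n = 0
--     for y in sorted_xs:
--         if y == x:
--             n += 1
--         elif y > x:
--             break
--     return n
--
--
-- def _distinct_sorted(xs):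
--     # number of distinct values in a sorted list: count boundaries between runs
--     n = 0
--     prev = None
--     for y in xs:
--         if n == 0 or y != prev:
--             n += 1
--         prev = y
--     return n
--
--
-- def resumo_kpis(alertas, total_equipamentos: int):
--     statuses = sorted(item["status"] for item in alertas)
--     ids_alerta = sorted(a["equipamento_id"] for a in alertas
--                         if a["status"] in ("VENCIDO", "PROXIMO"))
--     ids_vencido = sorted(a["equipamento_id"] for a in alertas
--                          if a["status"] == "VENCIDO")
--     ids_proximo = sorted(a["equipamento_id"] for a in alertas
--                          if a["status"] == "PROXIMO")
--     return {
--         "total_equipamentos": total_equipamentos,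
--         "total_alertas": len(alertas),
--         "vencidos": _run_count(statuses, "VENCIDO"),
--         "proximos": _run_count(statuses, "PROXIMO"),
--         "em_dia": _run_count(statuses, "EM DIA"),
--         "equipamentos_com_alerta": _distinct_sorted(ids_alerta),
--         "equipamentos_vencidos": _distinct_sorted(ids_vencido),
--         "equipamentos_proximos": _distinct_sorted(ids_proximo),
--     }
-- ===== Notes on version B (the rewrite author's own statement) =====
-- stated objective: alternative
-- what changed: Replaces hashing (Counter and set objects) by sort-then-scan: statuses and equipment-id lists are sorted, counts are read off as run lengths and distinct-equipment counts as the number of run boundaries in the sorted lists.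
import Mathlib
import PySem

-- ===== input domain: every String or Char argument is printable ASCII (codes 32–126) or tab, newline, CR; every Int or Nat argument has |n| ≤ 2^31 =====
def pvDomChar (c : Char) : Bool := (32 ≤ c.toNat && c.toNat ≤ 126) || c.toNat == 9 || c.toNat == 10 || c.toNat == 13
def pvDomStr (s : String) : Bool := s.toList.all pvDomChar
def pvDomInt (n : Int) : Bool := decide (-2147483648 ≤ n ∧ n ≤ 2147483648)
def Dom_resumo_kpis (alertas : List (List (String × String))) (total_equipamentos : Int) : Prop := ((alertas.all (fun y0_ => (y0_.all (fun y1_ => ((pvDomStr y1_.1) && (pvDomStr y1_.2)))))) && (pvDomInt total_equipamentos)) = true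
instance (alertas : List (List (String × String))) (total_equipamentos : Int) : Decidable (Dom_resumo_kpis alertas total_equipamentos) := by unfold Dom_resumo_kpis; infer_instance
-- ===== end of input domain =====

-- B replaces A's hashing (Counter + three sets) by sort-then-scan: sorted status and
-- id lists, counts as run lengths, distinct counts as run boundaries (objective: alternative).

-- shared trivial key lookups (dict access item["..."], first-match on the assoc list;
-- total forms: Pre_ guarantees the keys are present wherever they are read)
def pvStatus (item : List (String × String)) : String :=
  (PySem.Dict.mk item).getD "status" ""
def pvEqId (item : List (String × String)) : String :=
  (PySem.Dict.mk item).getD "equipamento_id" ""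

-- ===== PORT A =====
def resumo_kpis (alertas : List (List (String × String))) (total_equipamentos : Int) : List (String × Int) :=
  let contagem : PySem.Dict String Int := PySem.Dict.counter (alertas.map pvStatus)
  let eqp_alerta : PySem.Set String :=
    PySem.Set.ofList ((alertas.filter (fun a => pvStatus a == "VENCIDO" || pvStatus a == "PROXIMO")).map pvEqId)
  let eqp_vencido : PySem.Set String :=
    PySem.Set.ofList ((alertas.filter (fun a => pvStatus a == "VENCIDO")).map pvEqId)
  let eqp_proximo : PySem.Set String :=
    PySem.Set.ofList ((alertas.filter (fun a => pvStatus a == "PROXIMO")).map pvEqId)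
  [("total_equipamentos", total_equipamentos),
   ("total_alertas", (alertas.length : Int)),
   ("vencidos", contagem.getD "VENCIDO" 0),
   ("proximos", contagem.getD "PROXIMO" 0),
   ("em_dia", contagem.getD "EM DIA" 0),
   ("equipamentos_com_alerta", (PySem.Set.len eqp_alerta : Int)),
   ("equipamentos_vencidos", (PySem.Set.len eqp_vencido : Int)),
   ("equipamentos_proximos", (PySem.Set.len eqp_proximo : Int))]

-- ===== PORT B =====
-- _run_count(sorted_xs, x): scan, count the run of x, stop past it (break when y > x)
def pvRunCount (xs : List String) (x : String) : Int :=
  match xs with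
  | [] => 0
  | y :: ys => if y == x then 1 + pvRunCount ys x else if x < y then 0 else pvRunCount ys x

-- _distinct_sorted: tail of the loop, with prev = the last element seen (n ≥ 1 there)
def pvDistinctAux (prev : String) (xs : List String) : Int :=
  match xs with
  | [] => 0
  | y :: ys => (if y == prev then 0 else 1) + pvDistinctAux y ys

-- _distinct_sorted(xs): the first element always counts (the n == 0 test)
def pvDistinct (xs : List String) : Int :=
  match xs with
  | [] => 0
  | y :: ys => 1 + pvDistinctAux y ys

def resumo_kpis_alt (alertas : List (List (String × String))) (total_equipamentos : Int) : List (String × Int) :=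
  let statuses := PySem.List.sorted (alertas.map pvStatus) (fun x => x) false
  let ids_alerta := PySem.List.sorted
    ((alertas.filter (fun a => pvStatus a == "VENCIDO" || pvStatus a == "PROXIMO")).map pvEqId) (fun x => x) false
  let ids_vencido := PySem.List.sorted
    ((alertas.filter (fun a => pvStatus a == "VENCIDO")).map pvEqId) (fun x => x) false
  let ids_proximo := PySem.List.sorted
    ((alertas.filter (fun a => pvStatus a == "PROXIMO")).map pvEqId) (fun x => x) false
  [("total_equipamentos", total_equipamentos),
   ("total_alertas", (alertas.length : Int)),
   ("vencidos", pvRunCount statuses "VENCIDO"),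
   ("proximos", pvRunCount statuses "PROXIMO"),
   ("em_dia", pvRunCount statuses "EM DIA"),
   ("equipamentos_com_alerta", pvDistinct ids_alerta),
   ("equipamentos_vencidos", pvDistinct ids_vencido),
   ("equipamentos_proximos", pvDistinct ids_proximo)]

-- ===== PRECONDITION & SPEC =====
-- Pre_ excludes exactly the inputs where Python raises KeyError: an item without a
-- "status" key, or an item whose status is VENCIDO/PROXIMO without "equipamento_id".
def Pre_resumo_kpis (alertas : List (List (String × String))) (total_equipamentos : Int) : Prop :=
  (alertas.all (fun a =>
    (PySem.Dict.mk a).contains "status" &&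
    (!(pvStatus a == "VENCIDO" || pvStatus a == "PROXIMO") ||
      (PySem.Dict.mk a).contains "equipamento_id"))) = true
instance (alertas : List (List (String × String))) (total_equipamentos : Int) : Decidable (Pre_resumo_kpis alertas total_equipamentos) := by unfold Pre_resumo_kpis; infer_instance

def pvWitness_resumo_kpis : (List (List (String × String))) × Int :=
  ([[("status", "VENCIDO"), ("equipamento_id", "e1")],
    [("status", "EM DIA")],
    [("status", "PROXIMO"), ("equipamento_id", "e1")]], 4)

def Spec_resumo_kpis (alertas : List (List (String × String))) (total_equipamentos : Int) (out : List (String × Int)) : Prop := out = resumo_kpis_alt alertas total_equipamentos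
instance (alertas : List (List (String × String))) (total_equipamentos : Int) (out : List (String × Int)) : Decidable (Spec_resumo_kpis alertas total_equipamentos out) := by unfold Spec_resumo_kpis; infer_instance

-- ===== CLAIM (what is proved, stated in full; the proofs are below) =====
def Claim_equal_resumo_kpis : Prop := ∀ (alertas : List (List (String × String))) (total_equipamentos : Int), Dom_resumo_kpis alertas total_equipamentos → Pre_resumo_kpis alertas total_equipamentos → Spec_resumo_kpis alertas total_equipamentos (resumo_kpis alertas total_equipamentos)

-- ===== LEMMAS AND PROOFS =====

-- on a ≤-sorted list the run scan counts every occurrence: past the run nothing equals x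
lemma pvRunCount_eq_count (x : String) :
    ∀ l : List String, l.Pairwise (· ≤ ·) → pvRunCount l x = (l.count x : Int) := by
  intro l hl
  induction l with
  | nil => rfl
  | cons y ys ih =>
    rcases List.pairwise_cons.mp hl with ⟨hy, hys⟩
    by_cases hyx : y = x
    · subst hyx
      simp [pvRunCount, ih hys]
      omega
    · have hbe : (y == x) = false := by simp [hyx]
      by_cases hlt : x < y
      · have : ys.count x = 0 := by
          rw [List.count_eq_zero]
          intro hm
          exact absurd (hy x hm) (not_le.mpr hlt)
        simp [pvRunCount, hbe, hlt, hyx, this]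
      · simp [pvRunCount, hbe, hlt, hyx, ih hys]

-- on a ≤-sorted list counting run boundaries counts the distinct elements
lemma pvDistinctAux_eq_card (prev : String) :
    ∀ l : List String, (prev :: l).Pairwise (· ≤ ·) →
      1 + pvDistinctAux prev l = ((prev :: l).toFinset.card : Int) := by
  intro l
  induction l generalizing prev with
  | nil => intro _; simp [pvDistinctAux]
  | cons y ys ih =>
    intro h
    rcases List.pairwise_cons.mp h with ⟨hprev, hys⟩
    by_cases hy : y = prev
    · subst hy
      rw [show (y :: y :: ys).toFinset = (y :: ys).toFinset by simp]
      simpa [pvDistinctAux] using ih y hys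
    · have hbe : (y == prev) = false := by simp [hy]
      have hlt : prev < y := lt_of_le_of_ne (hprev y (by simp)) (Ne.symm hy)
      have hnotin : prev ∉ (y :: ys).toFinset := by
        simp only [List.toFinset_cons, Finset.mem_insert, List.mem_toFinset]
        rintro (rfl | hm)
        · exact absurd rfl hlt.ne'
        · rcases List.pairwise_cons.mp hys with ⟨hy2, _⟩
          exact absurd rfl (lt_of_lt_of_le hlt (hy2 prev hm)).ne'
      have := ih y hys
      rw [show (prev :: y :: ys).toFinset = insert prev (y :: ys).toFinset by simp,
        Finset.card_insert_of_notMem hnotin]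
      simp only [pvDistinctAux, hbe, Bool.false_eq_true, if_false]
      push_cast [this]
      omega

-- pvDistinct of any ≤-sorted list is the number of distinct elements
lemma pvDistinct_eq_card (l : List String) (hl : l.Pairwise (· ≤ ·)) :
    pvDistinct l = (l.toFinset.card : Int) := by
  cases l with
  | nil => rfl
  | cons y ys => exact pvDistinctAux_eq_card y ys hl

-- len(set(xs)) is the number of distinct elements of xs
lemma setLen_eq_card (l : List String) :
    (PySem.Set.len (PySem.Set.ofList l) : Int) = (l.toFinset.card : Int) := by
  have hnd : (PySem.Set.ofList l).Nodup := PySem.Set.nodup_ofList l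
  have hfs : (PySem.Set.ofList l).toFinset = l.toFinset := by
    ext x
    simp [PySem.Set.mem_ofList]
  have : (PySem.Set.ofList l).length = (PySem.Set.ofList l).toFinset.card :=
    (List.toFinset_card_of_nodup hnd).symm
  simp only [PySem.Set.len, this, hfs]

-- sortedness of PySem.List.sorted with the identity key, as plain ≤
lemma sorted_id_pairwise (l : List String) :
    (PySem.List.sorted l (fun x => x) false).Pairwise (· ≤ ·) :=
  PySem.List.sorted_pairwise l (fun x => x) 

-- the two distinct counters agree: B's boundary scan of sorted(l) = A's len(set(l))
lemma pvDistinct_sorted_eq_setLen (l : List String) :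
    pvDistinct (PySem.List.sorted l (fun x => x) false) = (PySem.Set.len (PySem.Set.ofList l) : Int) := by
  rw [pvDistinct_eq_card _ (sorted_id_pairwise l), setLen_eq_card,
    List.toFinset_eq_of_perm _ _ (PySem.List.sorted_perm l (fun x => x) false)]

-- the two counters agree: B's run count of sorted(l) = A's Counter lookup
lemma pvRunCount_sorted_eq_counter (l : List String) (x : String) :
    pvRunCount (PySem.List.sorted l (fun x => x) false) x = (PySem.Dict.counter l).getD x 0 := by
  rw [pvRunCount_eq_count x _ (sorted_id_pairwise l),
    (PySem.List.sorted_perm l (fun x => x) false).count_eq, PySem.Dict.getD_counter]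

-- ===== VERDICT (by name: the statement is the Claim_ definition above) =====
theorem resumo_kpis_spec : Claim_equal_resumo_kpis := by
  intro alertas total_equipamentos _ _
  unfold Spec_resumo_kpis resumo_kpis resumo_kpis_alt
  simp only [pvRunCount_sorted_eq_counter, pvDistinct_sorted_eq_setLen]
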